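-- pv_equiv track=rewrite | github.com/scott009/InquiryCircle | add_tibetan_keys.py | add_tibetan_keys_to_chapter
-- ===== SOURCE A (Python) =====
-- from collections import OrderedDict
--
-- def add_tibetan_keys_to_chapter(chapter):
--     """Add tibetan_title key to a chapter after Chinese_Simplified_title."""
--     if "title" not in chapter:
--         return chapter
--
--     # Create new ordered dict with correct key order
--     new_chapter = OrderedDict()
--
--     for key, value in chapter.items():
--         new_chapter[key] = value
--         # Insert tibetan_title after Chinese_Simplified_title
--         if key == "Chinese_Simplified_title":
--             new_chapter["tibetan_title"] = chapter.get("tibetan_title", "")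
--
--     return new_chapter
-- ===== SOURCE B (Python) =====
-- from collections import OrderedDict
--
-- def add_tibetan_keys_to_chapter(chapter):
--     """Add tibetan_title key to a chapter after Chinese_Simplified_title."""
--     if "title" not in chapter:
--         return chapter
--     items = list(chapter.items())
--     keys = [k for k, _ in items]
--     if "Chinese_Simplified_title" in keys:
--         idx = keys.index("Chinese_Simplified_title")
--         items.insert(idx + 1, ("tibetan_title", chapter.get("tibetan_title", "")))
--     return OrderedDict(items)
-- ===== Notes on version B (the rewrite author's own statement) =====
-- stated objective: alternative
-- what changed: Instead of rebuilding the dict item-by-item with a conditional insertion inside the copy loop, B takes the items list, finds the index of Chinese_Simplified_title, splices the tibetan pair in right after it, and lets the OrderedDict constructor's duplicate-key rule (first occurrence fixes position) collapse any pre-existing tibetan_title.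
import Mathlib
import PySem

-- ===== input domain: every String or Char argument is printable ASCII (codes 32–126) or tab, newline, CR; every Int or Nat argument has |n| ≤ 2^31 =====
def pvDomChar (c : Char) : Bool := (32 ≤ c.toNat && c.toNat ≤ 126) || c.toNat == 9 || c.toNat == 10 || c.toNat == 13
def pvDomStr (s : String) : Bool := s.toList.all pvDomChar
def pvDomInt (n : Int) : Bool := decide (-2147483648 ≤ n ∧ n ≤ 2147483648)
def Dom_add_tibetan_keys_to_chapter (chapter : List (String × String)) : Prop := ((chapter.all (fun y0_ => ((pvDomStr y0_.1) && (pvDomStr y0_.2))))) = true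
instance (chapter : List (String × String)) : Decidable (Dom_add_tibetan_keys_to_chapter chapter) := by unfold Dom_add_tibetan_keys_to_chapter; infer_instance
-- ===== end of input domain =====

-- ===== PORT A =====
-- A builds a new OrderedDict by copying every item and inserting
-- tibetan_title right after Chinese_Simplified_title.
def add_tibetan_keys_to_chapter (chapter : List (String × String)) : List (String × String) :=
  let d := PySem.Dict.ofList chapter
  if d.contains "title" = false then d.items
  else
    let new_chapter : PySem.Dict String String :=
      d.items.foldl (fun nd kv =>
        let nd := nd.insert kv.1 kv.2
        if kv.1 == "Chinese_Simplified_title" then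
          nd.insert "tibetan_title" (d.getD "tibetan_title" "")
        else nd) PySem.Dict.empty
    new_chapter.items

-- ===== PORT B =====
-- B: same behaviour by a different decomposition — take the items list,
-- find the index of Chinese_Simplified_title, splice the tibetan pair in
-- after it, and let the OrderedDict constructor collapse any duplicate key.
def add_tibetan_keys_to_chapter_alt (chapter : List (String × String)) : List (String × String) :=
  let d := PySem.Dict.ofList chapter
  if d.contains "title" = false then d.items
  else
    let items := d.items
    let keys := items.map Prod.fst
    let items2 :=
      if "Chinese_Simplified_title" ∈ keys then
        PySem.List.insert items
          ((((PySem.List.index? keys "Chinese_Simplified_title").getD 0 : Nat) : Int) + 1)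
          ("tibetan_title", d.getD "tibetan_title" "")
      else items
    (PySem.Dict.ofList items2).items

-- ===== PRECONDITION & SPEC =====
def Spec_add_tibetan_keys_to_chapter (chapter : List (String × String)) (out : List (String × String)) : Prop := out = add_tibetan_keys_to_chapter_alt chapter
instance (chapter : List (String × String)) (out : List (String × String)) : Decidable (Spec_add_tibetan_keys_to_chapter chapter out) := by unfold Spec_add_tibetan_keys_to_chapter; infer_instance

-- ===== CLAIM (what is proved, stated in full; the proofs are below) =====
def Claim_equal_add_tibetan_keys_to_chapter : Prop := ∀ (chapter : List (String × String)), Dom_add_tibetan_keys_to_chapter chapter → Spec_add_tibetan_keys_to_chapter chapter (add_tibetan_keys_to_chapter chapter)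

-- ===== LEMMAS AND PROOFS =====

-- The list A's loop effectively inserts: every item, with (T, tv) spliced in
-- after each Chinese_Simplified_title occurrence (at most one, keys are unique).
def pvSplice (tv : String) : List (String × String) → List (String × String)
  | [] => []
  | kv :: rest =>
      if kv.1 == "Chinese_Simplified_title" then
        kv :: ("tibetan_title", tv) :: pvSplice tv rest
      else kv :: pvSplice tv rest

-- A's conditional-insert loop is the plain insert loop over the spliced list.
theorem pv_fold_eq_splice (tv : String) (l : List (String × String))
    (nd : PySem.Dict String String) :
    l.foldl (fun nd kv =>
        let nd' := nd.insert kv.1 kv.2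
        if kv.1 == "Chinese_Simplified_title" then
          nd'.insert "tibetan_title" tv
        else nd') nd
      = (pvSplice tv l).foldl (fun nd kv => nd.insert kv.1 kv.2) nd := by
  induction l generalizing nd with
  | nil => rfl
  | cons kv rest ih =>
      rw [List.foldl_cons, ih]
      by_cases h : (kv.1 == "Chinese_Simplified_title") = true
      · have hs : pvSplice tv (kv :: rest)
            = kv :: ("tibetan_title", tv) :: pvSplice tv rest := by
          simp [pvSplice, h]
        rw [hs, List.foldl_cons, List.foldl_cons]
        congr 1
        simp [h]
      · have hs : pvSplice tv (kv :: rest) = kv :: pvSplice tv rest := by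
          simp [pvSplice, h]
        rw [hs, List.foldl_cons]
        congr 1
        simp [h]

theorem pv_splice_no_C (tv : String) (l : List (String × String))
    (h : "Chinese_Simplified_title" ∉ l.map Prod.fst) : pvSplice tv l = l := by
  induction l with
  | nil => rfl
  | cons kv rest ih =>
      simp only [List.map_cons, List.mem_cons, not_or] at h
      have hne : kv.1 ≠ "Chinese_Simplified_title" := fun hh => h.1 hh.symm
      simp [pvSplice, hne, ih h.2]

-- first-occurrence decomposition along index?
theorem pv_exists_decomp (l : List (String × String))
    (h : "Chinese_Simplified_title" ∈ l.map Prod.fst) :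
    ∃ l1 v l2, l = l1 ++ ("Chinese_Simplified_title", v) :: l2 ∧
      "Chinese_Simplified_title" ∉ l1.map Prod.fst ∧
      PySem.List.index? (l.map Prod.fst) "Chinese_Simplified_title" = some l1.length := by
  induction l with
  | nil => simp at h
  | cons kv rest ih =>
      by_cases hk : kv.1 = "Chinese_Simplified_title"
      · refine ⟨[], kv.2, rest, ?_, by simp, ?_⟩
        · rw [List.nil_append, ← hk]
        · rw [List.map_cons, hk, PySem.List.index?_cons_self]
          rfl
      · have hmem : "Chinese_Simplified_title" ∈ rest.map Prod.fst := by
          simp only [List.map_cons, List.mem_cons] at h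
          rcases h with h | h
          · exact absurd h.symm hk
          · exact h
        obtain ⟨l1, v, l2, hl, hnot, hidx⟩ := ih hmem
        refine ⟨kv :: l1, v, l2, by simp [hl], ?_, ?_⟩
        · simp only [List.map_cons, List.mem_cons, not_or]
          exact ⟨fun hh : "Chinese_Simplified_title" = kv.1 => hk hh.symm, hnot⟩
        · rw [List.map_cons, PySem.List.index?_cons_of_ne _ hk, hidx]
          simp

theorem pv_splice_decomp (tv v : String) (l1 l2 : List (String × String))
    (h1 : "Chinese_Simplified_title" ∉ l1.map Prod.fst)
    (h2 : "Chinese_Simplified_title" ∉ l2.map Prod.fst) :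
    pvSplice tv (l1 ++ ("Chinese_Simplified_title", v) :: l2)
      = l1 ++ ("Chinese_Simplified_title", v) :: ("tibetan_title", tv) :: l2 := by
  induction l1 with
  | nil => simp [pvSplice, pv_splice_no_C tv l2 h2]
  | cons kv rest ih =>
      simp only [List.map_cons, List.mem_cons, not_or] at h1
      have hne : ¬(kv.1 == "Chinese_Simplified_title") = true := by
        simp only [beq_iff_eq]
        exact fun hh => h1.1 hh.symm
      simp only [List.cons_append, pvSplice, if_neg hne]
      rw [ih h1.2]

theorem pv_splice_eq_items2 (tv : String) (l : List (String × String))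
    (hnd : (l.map Prod.fst).Nodup) :
    pvSplice tv l =
      (if "Chinese_Simplified_title" ∈ l.map Prod.fst then
        PySem.List.insert l
          ((((PySem.List.index? (l.map Prod.fst) "Chinese_Simplified_title").getD 0 : Nat) : Int) + 1)
          ("tibetan_title", tv)
      else l) := by
  by_cases h : "Chinese_Simplified_title" ∈ l.map Prod.fst
  · obtain ⟨l1, v, l2, hl, hnot, hidx⟩ := pv_exists_decomp l h
    have hnot2 : "Chinese_Simplified_title" ∉ l2.map Prod.fst := by
      rw [hl] at hnd
      simp only [List.map_append, List.map_cons] at hnd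
      have := (List.nodup_append.mp hnd).2.1
      exact (List.nodup_cons.mp this).1
    have hlen : l1.length + 1 ≤ l.length := by
      rw [hl]; simp
    have hcast : (((l1.length : Nat) : Int) + 1) = (((l1.length + 1 : Nat) : Int)) := by
      push_cast; ring
    rw [if_pos h, hidx]
    simp only [Option.getD_some, hcast, PySem.List.insert_natCast l (l1.length + 1) _ hlen]
    rw [hl]
    have hre : l1 ++ ("Chinese_Simplified_title", v) :: l2
        = (l1 ++ [("Chinese_Simplified_title", v)]) ++ l2 := by simp
    have htake : (l1 ++ ("Chinese_Simplified_title", v) :: l2).take (l1.length + 1)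
        = l1 ++ [("Chinese_Simplified_title", v)] := by
      rw [hre]
      exact List.take_left' (by simp)
    have hdrop : (l1 ++ ("Chinese_Simplified_title", v) :: l2).drop (l1.length + 1) = l2 := by
      rw [hre]
      exact List.drop_left' (by simp)
    rw [htake, hdrop, pv_splice_decomp tv v l1 l2 hnot hnot2]
    simp
  · rw [if_neg h]
    exact pv_splice_no_C tv l h

-- ===== VERDICT (by name: the statement is the Claim_ definition above) =====
theorem add_tibetan_keys_to_chapter_spec : Claim_equal_add_tibetan_keys_to_chapter := by
  intro chapter _
  unfold Spec_add_tibetan_keys_to_chapter add_tibetan_keys_to_chapter add_tibetan_keys_to_chapter_alt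
  by_cases hc : (PySem.Dict.ofList chapter).contains "title" = false
  · simp only [hc, if_true]
  · rw [if_neg hc, if_neg hc]
    have hnd : ((PySem.Dict.ofList chapter).items.map Prod.fst).Nodup :=
      PySem.Dict.nodup_keys_ofList chapter
    rw [pv_fold_eq_splice ((PySem.Dict.ofList chapter).getD "tibetan_title" "")
          (PySem.Dict.ofList chapter).items PySem.Dict.empty,
        pv_splice_eq_items2 _ _ hnd]
    rfl
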